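-- pv_equiv track=rewrite | github.com/dp-web4/web4 | web4-standard/implementation/reference/attack_mitigations.py | _detect_mutual_attestation
-- ===== SOURCE A (Python) =====
-- from typing import List, Set, Dict, Optional
--
-- def _detect_mutual_attestation(
--
--     attestations: List[Dict],
--     graph_analysis: Dict
-- ) -> int:
--     """
--     Count attestations that are part of mutual attestation patterns.
--
--     Mutual pattern: A attests for B, B attests for A (suspicious)
--     """
--     mutual_count = 0
--
--     # Build attestation graph
--     attestation_graph = {}
--     for att in attestations:
--         attester = att["attester_lct"]
--         subject = att["subject_lct"]
--
--         if attester not in attestation_graph: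
--             attestation_graph[attester] = set()
--
--         attestation_graph[attester].add(subject)
--
--     # Check for mutual relationships
--     for att in attestations:
--         attester = att["attester_lct"]
--         subject = att["subject_lct"]
--
--         # Is there a reverse attestation?
--         if subject in attestation_graph and attester in attestation_graph[subject]:
--             mutual_count += 1
--
--     return mutual_count
-- ===== SOURCE B (Python) =====
-- from typing import List, Dict
--
--
-- def _detect_mutual_attestation(
--     attestations: List[Dict],
--     graph_analysis: Dict
-- ) -> int:
--     # Group attestations by directed edge once, then scan the distinct
--     # edges with weighted counts instead of re-scanning the list.
--     edge_count = {}
--     for att in attestations: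
--         edge = (att["attester_lct"], att["subject_lct"])
--         edge_count[edge] = edge_count.get(edge, 0) + 1
--
--     total = 0
--     for (attester, subject), n in edge_count.items():
--         if (subject, attester) in edge_count:
--             total += n
--     return total
-- ===== Notes on version B (the rewrite author's own statement) =====
-- stated objective: alternative
-- what changed: Replaces the per-attester adjacency dict-of-sets plus a second full scan of the attestation list by a single edge-multiplicity counter whose distinct keys are scanned once with weighted sums.
import Mathlib
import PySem

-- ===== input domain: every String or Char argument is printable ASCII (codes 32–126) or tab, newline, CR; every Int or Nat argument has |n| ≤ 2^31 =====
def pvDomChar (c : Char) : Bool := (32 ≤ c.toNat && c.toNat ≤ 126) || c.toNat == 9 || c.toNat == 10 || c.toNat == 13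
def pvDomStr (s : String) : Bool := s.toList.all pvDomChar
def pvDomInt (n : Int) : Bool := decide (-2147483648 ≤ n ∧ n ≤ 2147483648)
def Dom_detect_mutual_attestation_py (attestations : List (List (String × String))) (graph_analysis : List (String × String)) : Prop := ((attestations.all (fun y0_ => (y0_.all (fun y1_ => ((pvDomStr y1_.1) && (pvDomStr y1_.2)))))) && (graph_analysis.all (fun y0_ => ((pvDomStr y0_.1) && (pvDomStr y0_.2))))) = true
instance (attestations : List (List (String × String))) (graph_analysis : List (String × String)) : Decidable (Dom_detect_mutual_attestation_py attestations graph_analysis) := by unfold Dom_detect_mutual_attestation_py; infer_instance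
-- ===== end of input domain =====

-- B replaces A's adjacency dict-of-sets + second full scan by one edge-multiplicity
-- counter whose distinct keys are scanned once with weighted sums (alternative decomposition).


-- att["attester_lct"] / att["subject_lct"] (Pre_ guarantees the key is present, so getD's default is never used)
def pvAttester (att : List (String × String)) : String :=
  ((PySem.Dict.mk att).get? "attester_lct").getD ""
def pvSubject (att : List (String × String)) : String :=
  ((PySem.Dict.mk att).get? "subject_lct").getD ""

-- ===== PORT A =====
def detect_mutual_attestation_py (attestations : List (List (String × String))) (graph_analysis : List (String × String)) : Int :=
  -- build attestation graph: attester ↦ set of subjects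
  let graph : PySem.Dict String (PySem.Set String) :=
    attestations.foldl (fun g att =>
      let attester := pvAttester att
      let subject := pvSubject att
      let g1 := if g.contains attester then g else g.insert attester PySem.Set.empty
      g1.insert attester (PySem.Set.add (g1.getD attester PySem.Set.empty) subject)) PySem.Dict.empty
  -- check for mutual relationships
  attestations.foldl (fun mutual_count att =>
      let attester := pvAttester att
      let subject := pvSubject att
      match graph.get? subject with
      | some st => if PySem.Set.contains st attester then mutual_count + 1 else mutual_count
      | none => mutual_count) 0

-- ===== PORT B =====
def detect_mutual_attestation_py_alt (attestations : List (List (String × String))) (graph_analysis : List (String × String)) : Int :=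
  let edge_count : PySem.Dict (String × String) Int :=
    attestations.foldl (fun d att =>
      let e := (pvAttester att, pvSubject att)
      d.insert e (d.getD e 0 + 1)) PySem.Dict.empty
  edge_count.items.foldl (fun total p =>
      if edge_count.contains (p.1.2, p.1.1) then total + p.2 else total) 0

-- ===== PRECONDITION & SPEC =====
-- Pre_ excludes exactly the attestation dicts missing one of the two keys, where Python A raises KeyError.
def Pre_detect_mutual_attestation_py (attestations : List (List (String × String))) (graph_analysis : List (String × String)) : Prop :=
  ∀ att ∈ attestations, (PySem.Dict.mk att).contains "attester_lct" = true ∧ (PySem.Dict.mk att).contains "subject_lct" = true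
instance (attestations : List (List (String × String))) (graph_analysis : List (String × String)) : Decidable (Pre_detect_mutual_attestation_py attestations graph_analysis) := by unfold Pre_detect_mutual_attestation_py; infer_instance

def pvWitness_detect_mutual_attestation_py : (List (List (String × String))) × (List (String × String)) :=
  ([[("attester_lct", "a"), ("subject_lct", "b")], [("attester_lct", "b"), ("subject_lct", "a")]], [])

def Spec_detect_mutual_attestation_py (attestations : List (List (String × String))) (graph_analysis : List (String × String)) (out : Int) : Prop := out = detect_mutual_attestation_py_alt attestations graph_analysis
instance (attestations : List (List (String × String))) (graph_analysis : List (String × String)) (out : Int) : Decidable (Spec_detect_mutual_attestation_py attestations graph_analysis out) := by unfold Spec_detect_mutual_attestation_py; infer_instance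

-- ===== CLAIM (what is proved, stated in full; the proofs are below) =====
def Claim_equal_detect_mutual_attestation_py : Prop := ∀ (attestations : List (List (String × String))) (graph_analysis : List (String × String)), Dom_detect_mutual_attestation_py attestations graph_analysis → Pre_detect_mutual_attestation_py attestations graph_analysis → Spec_detect_mutual_attestation_py attestations graph_analysis (detect_mutual_attestation_py attestations graph_analysis)

-- ===== LEMMAS AND PROOFS =====

-- directed edge of one attestation
def pvKey (att : List (String × String)) : String × String := (pvAttester att, pvSubject att)

-- B's first loop (the edge counter), named for the lemmas
def pvEC (attestations : List (List (String × String))) : PySem.Dict (String × String) Int :=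
  attestations.foldl (fun d att =>
    d.insert (pvAttester att, pvSubject att) (d.getD (pvAttester att, pvSubject att) 0 + 1))
    PySem.Dict.empty

-- A's graph-building step, named for the lemmas
def pvStepA (g : PySem.Dict String (PySem.Set String)) (att : List (String × String)) : PySem.Dict String (PySem.Set String) :=
  let attester := pvAttester att
  let subject := pvSubject att
  let g1 := if g.contains attester then g else g.insert attester PySem.Set.empty
  g1.insert attester (PySem.Set.add (g1.getD attester PySem.Set.empty) subject)

theorem pvStepA_mem (g : PySem.Dict String (PySem.Set String)) (att : List (String × String)) (x y : String) :
    y ∈ (pvStepA g att).getD x PySem.Set.empty ↔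
      y ∈ g.getD x PySem.Set.empty ∨ (x = pvAttester att ∧ y = pvSubject att) := by
  unfold pvStepA
  by_cases hx : x = pvAttester att
  · subst hx
    by_cases hc : g.contains (pvAttester att) = true
    · simp [hc, PySem.Dict.getD_insert_self, PySem.Set.mem_add]
    · simp only [Bool.not_eq_true] at hc
      have h0 : g.getD (pvAttester att) ([] : PySem.Set String) = [] :=
        PySem.Dict.getD_of_not_contains g ([] : PySem.Set String) hc
      simp [hc, PySem.Dict.getD_insert_self, PySem.Set.mem_add, h0, PySem.Set.empty]
  · by_cases hc : g.contains (pvAttester att) = true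
    · simp [hc, PySem.Dict.getD_insert_of_ne _ _ _ hx, hx]
    · simp only [Bool.not_eq_true] at hc
      simp [hc, PySem.Dict.getD_insert_of_ne _ _ _ hx, hx]

theorem pvGraph_mem (l : List (List (String × String))) (g : PySem.Dict String (PySem.Set String)) (x y : String) :
    y ∈ (l.foldl pvStepA g).getD x PySem.Set.empty ↔
      y ∈ g.getD x PySem.Set.empty ∨ (x, y) ∈ l.map pvKey := by
  induction l generalizing g with
  | nil => simp
  | cons att rest ih =>
      simp only [List.foldl_cons, List.map_cons, List.mem_cons, ih, pvStepA_mem, pvKey,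
        Prod.mk.injEq]
      tauto

-- the `match` in A's second loop, as an if on getD
theorem pvMatch_eq (g : PySem.Dict String (PySem.Set String)) (x y : String) (c : Int) :
    (match g.get? x with
      | some st => if PySem.Set.contains st y then c + 1 else c
      | none => c)
    = if PySem.Set.contains (g.getD x PySem.Set.empty) y then c + 1 else c := by
  cases h : g.get? x with
  | none => simp [PySem.Dict.getD_eq_get?_getD, h, PySem.Set.empty, PySem.Set.contains]
  | some st => simp [PySem.Dict.getD_eq_get?_getD, h]

-- counting loop = countP
theorem pvFoldl_count {α : Type} (q : α → Bool) (l : List α) (c : Int) :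
    l.foldl (fun c x => if q x then c + 1 else c) c = c + (l.countP q : Int) := by
  induction l generalizing c with
  | nil => simp
  | cons a rest ih =>
      by_cases h : q a = true <;> simp [h, ih, List.countP_cons] <;> ring

-- weighted-sum loop of B = sum of the mapped weights
theorem pvFoldl_wsum {α : Type} (p : α → Bool) (cnt : α → Nat) (d : List α) (t : Int) :
    d.foldl (fun t e => if p e then t + ((cnt e : Nat) : Int) else t) t
      = t + ((d.map (fun e => if p e then cnt e else 0)).sum : Int) := by
  induction d generalizing t with
  | nil => simp
  | cons a rest ih =>
      by_cases h : p a = true <;> simp [h, ih] <;> ring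

-- indicator sum over a list = multiplicity
theorem pvSum_indicator {α : Type} [BEq α] [LawfulBEq α] (d : List α) (y : α) :
    (d.map (fun e => if y == e then 1 else 0)).sum = d.count y := by
  induction d with
  | nil => simp
  | cons a d' ih =>
      simp only [List.map_cons, List.sum_cons, List.count_cons, ih]
      by_cases h : y = a
      · subst h; simp [Nat.add_comm]
      · simp [h, Ne.symm h]

-- sum over a nodup index of multiplicities = length
theorem pvSum_count {α : Type} [BEq α] [LawfulBEq α] (d : List α) (hnd : d.Nodup) :
    ∀ ys : List α, (∀ y ∈ ys, y ∈ d) → (d.map (fun e => ys.count e)).sum = ys.length := by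
  intro ys
  induction ys with
  | nil => intro _; simp
  | cons y ys ih =>
      intro hmem
      have hy : y ∈ d := hmem y (by simp)
      have hrec := ih (fun z hz => hmem z (by simp [hz]))
      calc (d.map (fun e => (y :: ys).count e)).sum
          = (d.map (fun e => ys.count e + if y == e then 1 else 0)).sum := by
            simp [List.count_cons]
        _ = (d.map (fun e => ys.count e)).sum + (d.map (fun e => if y == e then 1 else 0)).sum :=
            List.sum_map_add
        _ = ys.length + 1 := by
            rw [hrec, pvSum_indicator, List.count_eq_one_of_mem hnd hy]
        _ = (y :: ys).length := by simp

-- Set.contains as a decide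
theorem pvContains_decide {α : Type} [BEq α] [LawfulBEq α] (s : PySem.Set α) (z : α) :
    PySem.Set.contains s z = decide (z ∈ s) := by
  simp [List.contains_eq_mem]

-- the whole equivalence, through the common edge list
theorem pvMain (attestations : List (List (String × String))) (graph_analysis : List (String × String)) :
    detect_mutual_attestation_py attestations graph_analysis
      = detect_mutual_attestation_py_alt attestations graph_analysis := by
  set edges := attestations.map pvKey with hedges
  set p : String × String → Bool := fun e => decide ((e.2, e.1) ∈ edges) with hp
  -- zeta-reduced bodies of the two ports
  have hLA : detect_mutual_attestation_py attestations graph_analysis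
      = attestations.foldl (fun mutual_count att =>
          match (attestations.foldl pvStepA PySem.Dict.empty).get? (pvSubject att) with
          | some st => if PySem.Set.contains st (pvAttester att) then mutual_count + 1 else mutual_count
          | none => mutual_count) (0 : Int) := rfl
  have hLB : detect_mutual_attestation_py_alt attestations graph_analysis
      = (pvEC attestations).items.foldl
          (fun total pr =>
            if (pvEC attestations).contains (pr.1.2, pr.1.1) then total + pr.2 else total)
          (0 : Int) := rfl
  -- ---------- A side: the graph characterises edge membership ----------
  have hgraph : ∀ x y, (y ∈ (attestations.foldl pvStepA PySem.Dict.empty).getD x PySem.Set.empty)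
      ↔ (x, y) ∈ edges := by
    intro x y
    rw [pvGraph_mem]
    simp [PySem.Dict.getD_empty, PySem.Set.empty, hedges]
  have hA : detect_mutual_attestation_py attestations graph_analysis
      = ((edges.countP p : Nat) : Int) := by
    rw [hLA]
    have hfun : (fun (mutual_count : Int) att =>
        match (attestations.foldl pvStepA PySem.Dict.empty).get? (pvSubject att) with
        | some st => if PySem.Set.contains st (pvAttester att) then mutual_count + 1 else mutual_count
        | none => mutual_count)
        = fun (mutual_count : Int) att =>
            if p (pvKey att) then mutual_count + 1 else mutual_count := by
      funext mutual_count att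
      rw [pvMatch_eq, pvContains_decide, hp]
      simp only [pvKey, hgraph]
      rfl
    rw [hfun, pvFoldl_count (fun att => p (pvKey att)) attestations 0]
    rw [hedges, List.countP_map]
    show (0 : Int) + _ = _
    rw [zero_add]
    rfl
  -- ---------- B side: the dict is the edge counter ----------
  have hcnt : pvEC attestations = PySem.Dict.counter edges := by
    unfold pvEC
    rw [hedges, ← PySem.Dict.foldl_insert_getD_add_one_eq_counter, List.foldl_map]
    simp only [pvKey]
  have hB : detect_mutual_attestation_py_alt attestations graph_analysis
      = (PySem.Set.ofList edges).foldl
          (fun total e => if p e then total + ((edges.count e : Nat) : Int) else total) 0 := by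
    rw [hLB, hcnt, PySem.Dict.items_counter, List.foldl_map]
    congr 1
    funext total e
    simp only [hp]
    rw [PySem.Dict.contains_counter, List.contains_eq_mem]
  -- ---------- weighted sum over distinct edges = plain count ----------
  have hcf : ∀ e : String × String, (if p e then edges.count e else 0) = (edges.filter p).count e := by
    intro e
    by_cases h : p e = true
    · simp [h, List.count_filter h]
    · have hnm : e ∉ edges.filter p := fun hmem => h (List.mem_filter.mp hmem).2
      simp [h, List.count_eq_zero.mpr hnm]
  have hsum : ((PySem.Set.ofList edges).map (fun e => if p e then edges.count e else 0)).sum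
      = edges.countP p := by
    calc ((PySem.Set.ofList edges).map (fun e => if p e then edges.count e else 0)).sum
        = ((PySem.Set.ofList edges).map (fun e => (edges.filter p).count e)).sum := by
          simp only [hcf]
      _ = (edges.filter p).length :=
          pvSum_count (PySem.Set.ofList edges) (PySem.Set.nodup_ofList edges) (edges.filter p)
            (fun y hy => by
              have := (List.mem_filter.mp hy).1
              simp [PySem.Set.mem_ofList, this])
      _ = edges.countP p := (List.countP_eq_length_filter).symm
  rw [hA, hB, pvFoldl_wsum p (fun e => edges.count e) (PySem.Set.ofList edges) 0, hsum]
  simp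

-- ===== VERDICT =====
theorem detect_mutual_attestation_py_spec : Claim_equal_detect_mutual_attestation_py := by
  intro attestations graph_analysis _ _
  exact pvMain attestations graph_analysis
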